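-- pv_equiv track=rewrite | github.com/MinhDg00/gpm | learning/helper.py | populate_missing_pt
-- ===== SOURCE A (Python) =====
-- def populate_missing_pt(pt):
--
--     lst = []
--
--     def helper(s, idx):
--         if idx == len(s):
--             lst.append(list(map(int, s)))
--             return
--
--         if s[idx] == '?':
--             for i in ['0', '1']:
--                 s[idx] = i
--                 helper(s, idx + 1)
--             s[idx] = '?'
--         else:
--             helper(s, idx + 1)
--
--     helper(pt, 0)
--
--     return lst
-- ===== SOURCE B (Python) =====
-- def populate_missing_pt(pt):
--     idxs = [i for i, c in enumerate(pt) if c == '?']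
--     k = len(idxs)
--     out = []
--     for mask in range(1 << k):
--         row = list(pt)
--         for j, i in enumerate(idxs):
--             row[i] = '1' if (mask >> (k - 1 - j)) & 1 else '0'
--         out.append(list(map(int, row)))
--     return out
-- ===== Notes on version B (the rewrite author's own statement) =====
-- stated objective: alternative
-- what changed: Replaces the mutating backtracking recursion by a counting enumeration: collect the '?' positions once, then for each mask in range(2**k) write the mask's bits (MSB first) into a fresh copy and convert.
import Mathlib
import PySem

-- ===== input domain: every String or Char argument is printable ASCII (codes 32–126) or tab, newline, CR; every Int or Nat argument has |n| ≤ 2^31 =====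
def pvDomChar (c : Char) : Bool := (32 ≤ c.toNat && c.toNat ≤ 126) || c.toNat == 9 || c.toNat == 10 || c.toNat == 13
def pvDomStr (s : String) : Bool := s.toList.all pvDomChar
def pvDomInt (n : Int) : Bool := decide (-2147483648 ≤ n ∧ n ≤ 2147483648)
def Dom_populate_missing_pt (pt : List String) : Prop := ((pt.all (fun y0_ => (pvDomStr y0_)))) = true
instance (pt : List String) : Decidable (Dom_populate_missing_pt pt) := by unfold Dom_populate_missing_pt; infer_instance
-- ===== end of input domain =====

-- B replaces A's mutating backtracking recursion by a bitmask counting enumeration (same cost; a timing run reported no speedup).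
-- A restores pt in place before returning, so the caller observes no mutation; B never mutates.

-- ===== PORT A =====
-- int(x); Pre_ guarantees parse success for every converted element, so the default 0 is never used on admitted inputs
def pyInt (s : String) : Int := (PySem.Int.ofStr? s).getD 0

-- the nested 'helper': the net effect of Python's s[idx]='0'/'1' then restore to '?' is the functional s.set idx.
-- Reachable calls have idx ≤ len(s), where the guard equals Python's 'idx == len(s)'.
def pvHelperA (s : List String) (idx : Nat) : List (List Int) :=
  if s.length ≤ idx then [s.map pyInt]
  else if s.getD idx "" = "?" then
    pvHelperA (s.set idx "0") (idx + 1) ++ pvHelperA (s.set idx "1") (idx + 1)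
  else
    pvHelperA s (idx + 1)
termination_by s.length - idx
decreasing_by all_goals simp_all [List.length_set]; omega

def populate_missing_pt (pt : List String) : List (List Int) := pvHelperA pt 0

-- ===== PORT B =====
-- [i for i, c in enumerate(pt) if c == '?']  (indices from 0, hence Nat)
def pvQIdxs : List String → Nat → List Nat
  | [], _ => []
  | c :: rest, i => if c = "?" then i :: pvQIdxs rest (i + 1) else pvQIdxs rest (i + 1)

-- '1' if (mask >> (k - 1 - j)) & 1 else '0'
def pvBitStr (k mask j : Nat) : String := if (mask >>> (k - 1 - j)) &&& 1 = 1 then "1" else "0"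

-- the inner 'for j, i in enumerate(idxs): row[i] = …'
def pvFillRow (k mask : Nat) : List String → Nat → List Nat → List String
  | r, _, [] => r
  | r, j, i :: rest => pvFillRow k mask (r.set i (pvBitStr k mask j)) (j + 1) rest

def populate_missing_pt_alt (pt : List String) : List (List Int) :=
  let idxs := pvQIdxs pt 0
  let k := idxs.length
  (List.range (2 ^ k)).map (fun mask => (pvFillRow k mask pt 0 idxs).map pyInt)

-- ===== PRECONDITION & SPEC =====
-- Pre_: exactly the inputs where Python A returns; on any element that is neither '?' nor int-parseable, int() raises ValueError.
def Pre_populate_missing_pt (pt : List String) : Prop :=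
  ∀ s ∈ pt, s = "?" ∨ (PySem.Int.ofStr? s).isSome = true
instance (pt : List String) : Decidable (Pre_populate_missing_pt pt) := by
  unfold Pre_populate_missing_pt; infer_instance

def pvWitness_populate_missing_pt : List String := ["?", "3", "?"]

def Spec_populate_missing_pt (pt : List String) (out : List (List Int)) : Prop := out = populate_missing_pt_alt pt
instance (pt : List String) (out : List (List Int)) : Decidable (Spec_populate_missing_pt pt out) := by unfold Spec_populate_missing_pt; infer_instance

-- ===== CLAIM (what is proved, stated in full; the proofs are below) =====
def Claim_equal_populate_missing_pt : Prop := ∀ (pt : List String), Dom_populate_missing_pt pt → Pre_populate_missing_pt pt → Spec_populate_missing_pt pt (populate_missing_pt pt)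

-- ===== LEMMAS AND PROOFS =====

-- the common specification: fillings of the suffix, first '?' varying slowest, 0 before 1
def pvFills : List String → List (List Int)
  | [] => [[]]
  | c :: rest =>
    if c = "?" then
      (pvFills rest).map (fun t => 0 :: t) ++ (pvFills rest).map (fun t => 1 :: t)
    else
      (pvFills rest).map (fun t => pyInt c :: t)

theorem pvSet_append_right (pre : List String) (c b : String) (rest : List String) :
    (pre ++ c :: rest).set pre.length b = pre ++ b :: rest := by
  induction pre with
  | nil => rfl
  | cons x xs ih => simp [ih]

theorem pvGetD_append (pre : List String) (c : String) (rest : List String) :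
    (pre ++ c :: rest).getD pre.length "" = c := by
  induction pre with
  | nil => rfl
  | cons x xs ih => simp only [List.cons_append, List.length_cons, List.getD_cons_succ]; exact ih

theorem pvHelperA_eq_fills (s : List String) (pre : List String) :
    pvHelperA (pre ++ s) pre.length = (pvFills s).map (fun t => pre.map pyInt ++ t) := by
  induction s generalizing pre with
  | nil => rw [pvHelperA]; simp [pvFills]
  | cons c rest ih =>
    rw [pvHelperA]
    have hlen : ¬ (pre ++ c :: rest).length ≤ pre.length := by simp
    rw [if_neg hlen, pvGetD_append]
    by_cases hc : c = "?"
    · subst hc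
      rw [if_pos rfl]
      rw [pvSet_append_right, pvSet_append_right]
      have h0 := ih (pre ++ ["0"])
      have h1 := ih (pre ++ ["1"])
      simp only [List.append_assoc, List.length_append, List.length_cons,
        List.length_nil, List.singleton_append] at h0 h1
      rw [show pre.length + (0 + 1) = pre.length + 1 from by omega] at h0 h1
      rw [h0, h1]
      have e0 : pyInt "0" = 0 := by decide
      have e1 : pyInt "1" = 1 := by decide
      simp [pvFills, List.map_map, Function.comp_def, e0, e1]
    · rw [if_neg hc]
      have h := ih (pre ++ [c])
      simp only [List.append_assoc, List.length_append, List.length_cons,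
        List.length_nil, List.singleton_append] at h
      rw [show pre.length + (0 + 1) = pre.length + 1 from by omega] at h
      rw [h]
      simp [pvFills, hc, List.map_map, Function.comp_def]

-- sequential sets along pvQIdxs
def pvSetAll : List String → List Nat → List String → List String
  | r, _, [] => r
  | r, [], _ => r
  | r, i :: is, b :: bs => pvSetAll (r.set i b) is bs

def pvBits (k mask : Nat) : List String := (List.range k).map (fun t => pvBitStr k mask t)

theorem pvFillRow_eq_setAll (k mask : Nat) (idxs : List Nat) (r : List String) (j : Nat) :
    pvFillRow k mask r j idxs =
      pvSetAll r idxs ((List.range idxs.length).map (fun t => pvBitStr k mask (j + t))) := by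
  induction idxs generalizing r j with
  | nil => simp [pvFillRow, pvSetAll]
  | cons i is ih =>
    rw [pvFillRow, List.length_cons, List.range_succ_eq_map]
    simp only [List.map_cons, List.map_map]
    rw [pvSetAll, ih]
    congr 1
    apply List.map_congr_left
    intro t _
    simp [Function.comp]
    congr 1
    omega

theorem pvQIdxs_shift (rest : List String) (i : Nat) :
    pvQIdxs rest (i + 1) = (pvQIdxs rest i).map (· + 1) := by
  induction rest generalizing i with
  | nil => rfl
  | cons c cs ih =>
    by_cases hc : c = "?" <;> simp [pvQIdxs, hc, ih]

theorem pvSetAll_shift (c : String) (r : List String) (is : List Nat) (bs : List String) :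
    pvSetAll (c :: r) (is.map (· + 1)) bs = c :: pvSetAll r is bs := by
  induction is generalizing r bs with
  | nil => cases bs <;> rfl
  | cons i it ih =>
    cases bs with
    | nil => rfl
    | cons b bt => simp [pvSetAll, ih]

theorem pvBitStr_tail (k m t : Nat) : pvBitStr (k + 1) m (t + 1) = pvBitStr k m t := by
  unfold pvBitStr
  rw [show k + 1 - 1 - (t + 1) = k - 1 - t from by omega]

theorem pvBits_succ (k m : Nat) :
    pvBits (k + 1) m = pvBitStr (k + 1) m 0 :: pvBits k m := by
  rw [pvBits, List.range_succ_eq_map]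
  simp only [List.map_cons, List.map_map]
  congr 1
  apply List.map_congr_left
  intro t _
  simpa [Function.comp] using pvBitStr_tail k m t

theorem pvBitStr_high (k m t : Nat) (ht : t < k) :
    pvBitStr k (2 ^ k + m) t = pvBitStr k m t := by
  unfold pvBitStr
  have hs : k - 1 - t ≤ k - 1 := by omega
  set s := k - 1 - t with hsdef
  have hk : 2 ^ k = 2 ^ (k - s) * 2 ^ s := by
    rw [← pow_add]; congr 1; omega
  have hpos : 0 < 2 ^ s := Nat.two_pow_pos s
  have hdiv : (2 ^ k + m) / 2 ^ s = m / 2 ^ s + 2 ^ (k - s) := by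
    rw [hk, Nat.add_comm, Nat.add_mul_div_right _ _ hpos]
  have heven : 2 ^ (k - s) % 2 = 0 := by
    have h1 : 1 ≤ k - s := by omega
    have : 2 ^ (k - s) = 2 * 2 ^ (k - s - 1) := by
      rw [← pow_succ']; congr 1; omega
    omega
  have hmod : (2 ^ k + m) / 2 ^ s % 2 = m / 2 ^ s % 2 := by
    rw [hdiv]; omega
  simp only [Nat.shiftRight_eq_div_pow, Nat.and_one_is_mod, hmod]

theorem pvBitStr_head_low (k m : Nat) (hm : m < 2 ^ k) :
    pvBitStr (k + 1) m 0 = "0" := by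
  unfold pvBitStr
  have : m >>> k = 0 := by
    rw [Nat.shiftRight_eq_div_pow]
    exact Nat.div_eq_of_lt hm
  simp [this]

theorem pvBitStr_head_high (k m : Nat) (hm : m < 2 ^ k) :
    pvBitStr (k + 1) (2 ^ k + m) 0 = "1" := by
  unfold pvBitStr
  have : (2 ^ k + m) >>> k = 1 := by
    rw [Nat.shiftRight_eq_div_pow]
    rw [Nat.add_comm, Nat.add_div_right _ (Nat.two_pow_pos k),
      Nat.div_eq_of_lt hm]
  simp [this]

theorem pvBits_high (k m : Nat) :
    pvBits k (2 ^ k + m) = pvBits k m := by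
  rw [pvBits, pvBits]
  apply List.map_congr_left
  intro t ht
  exact pvBitStr_high k m t (List.mem_range.mp ht)

theorem pvRows_eq_fills (pt : List String) :
    (List.range (2 ^ (pvQIdxs pt 0).length)).map
      (fun m => (pvSetAll pt (pvQIdxs pt 0) (pvBits (pvQIdxs pt 0).length m)).map pyInt)
      = pvFills pt := by
  induction pt with
  | nil => simp [pvQIdxs, pvSetAll, pvFills, pvBits]
  | cons c rest ih =>
    by_cases hc : c = "?"
    · subst hc
      rw [show pvQIdxs ("?" :: rest) 0 = 0 :: (pvQIdxs rest 0).map (· + 1) from by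
        simp [pvQIdxs, pvQIdxs_shift]]
      set k := (pvQIdxs rest 0).length with hk
      have hlen : (0 :: (pvQIdxs rest 0).map (· + 1)).length = k + 1 := by simp [hk]
      rw [hlen]
      have hsplit : (2 : Nat) ^ (k + 1) = 2 ^ k + 2 ^ k := by ring
      rw [hsplit, List.range_add, List.map_append, List.map_map]
      have hlow : ∀ m ∈ List.range (2 ^ k),
          (pvSetAll ("?" :: rest) (0 :: (pvQIdxs rest 0).map (· + 1)) (pvBits (k + 1) m)).map pyInt
            = (0 : Int) :: (pvSetAll rest (pvQIdxs rest 0) (pvBits k m)).map pyInt := by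
        intro m hm
        rw [pvBits_succ, pvBitStr_head_low k m (List.mem_range.mp hm)]
        rw [pvSetAll, show ("?" :: rest).set 0 "0" = "0" :: rest from rfl, pvSetAll_shift]
        simp [show pyInt "0" = 0 from by decide]
      have hhigh : ∀ m ∈ List.range (2 ^ k),
          (pvSetAll ("?" :: rest) (0 :: (pvQIdxs rest 0).map (· + 1)) (pvBits (k + 1) (2 ^ k + m))).map pyInt
            = (1 : Int) :: (pvSetAll rest (pvQIdxs rest 0) (pvBits k m)).map pyInt := by
        intro m hm
        rw [pvBits_succ, pvBitStr_head_high k m (List.mem_range.mp hm),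
          pvBits_high k m]
        rw [pvSetAll, show ("?" :: rest).set 0 "1" = "1" :: rest from rfl, pvSetAll_shift]
        simp [show pyInt "1" = 1 from by decide]
      rw [pvFills, if_pos rfl, ← ih, List.map_map, List.map_map]
      congr 1
      · apply List.map_congr_left
        intro m hm
        simpa [Function.comp] using hlow m hm
      · apply List.map_congr_left
        intro m hm
        simpa [Function.comp] using hhigh m hm
    · rw [show pvQIdxs (c :: rest) 0 = (pvQIdxs rest 0).map (· + 1) from by
        simp [pvQIdxs, hc, pvQIdxs_shift]]
      set k := (pvQIdxs rest 0).length with hk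
      have hlen : ((pvQIdxs rest 0).map (· + 1)).length = k := by simp [hk]
      rw [hlen]
      have hstep : ∀ m ∈ List.range (2 ^ k),
          (pvSetAll (c :: rest) ((pvQIdxs rest 0).map (· + 1)) (pvBits k m)).map pyInt
            = pyInt c :: (pvSetAll rest (pvQIdxs rest 0) (pvBits k m)).map pyInt := by
        intro m _
        rw [pvSetAll_shift]; simp
      rw [pvFills, if_neg hc, ← ih, List.map_map]
      apply List.map_congr_left
      intro m hm
      simpa [Function.comp] using hstep m hm

theorem pvAlt_eq_fills (pt : List String) :
    populate_missing_pt_alt pt = pvFills pt := by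
  rw [populate_missing_pt_alt, ← pvRows_eq_fills pt]
  apply List.map_congr_left
  intro m _
  rw [pvFillRow_eq_setAll]
  congr 1
  simp [pvBits]

-- ===== VERDICT (by name: the statement is the Claim_ definition above) =====
theorem populate_missing_pt_spec : Claim_equal_populate_missing_pt := by
  intro pt _ _
  show populate_missing_pt pt = populate_missing_pt_alt pt
  rw [pvAlt_eq_fills]
  have h := pvHelperA_eq_fills pt []
  simpa [populate_missing_pt] using h
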